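-- pv_equiv track=rewrite | github.com/gousaiyang/SE342-simple-image-processor | transformation/morph.py | check_grayscale_se
-- ===== SOURCE A (Python) =====
-- def check_grayscale_se(se):
--     if not isinstance(se, list):
--         return False
--
--     a = len(se)
--     b = None
--
--     for item in se:
--         if not isinstance(item, list):
--             return False
--
--         l = len(item)
--
--         if b is None:
--             b = l
--         elif b != l:
--             return False
--
--         for subitem in item:
--             if subitem not in range(256):
--                 return False
--
--     return bool(a % 2) and b is not None and bool(b % 2)
-- ===== SOURCE B (Python) =====
-- def check_grayscale_se(se):
--     if not isinstance(se, list) or not se: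
--         return False
--     if not all(isinstance(item, list) for item in se):
--         return False
--     if len({len(item) for item in se}) != 1:
--         return False
--     if not all(sub in range(256) for item in se for sub in item):
--         return False
--     return len(se) % 2 == 1 and len(se[0]) % 2 == 1
-- ===== Notes on version B (the rewrite author's own statement) =====
-- stated objective: simpler
-- what changed: Replaces the single interleaved loop with a compare-to-first length accumulator by separate whole-list passes: a set of row lengths checked to have one element, then one all() over all values, then the parity test.
import Mathlib
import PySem

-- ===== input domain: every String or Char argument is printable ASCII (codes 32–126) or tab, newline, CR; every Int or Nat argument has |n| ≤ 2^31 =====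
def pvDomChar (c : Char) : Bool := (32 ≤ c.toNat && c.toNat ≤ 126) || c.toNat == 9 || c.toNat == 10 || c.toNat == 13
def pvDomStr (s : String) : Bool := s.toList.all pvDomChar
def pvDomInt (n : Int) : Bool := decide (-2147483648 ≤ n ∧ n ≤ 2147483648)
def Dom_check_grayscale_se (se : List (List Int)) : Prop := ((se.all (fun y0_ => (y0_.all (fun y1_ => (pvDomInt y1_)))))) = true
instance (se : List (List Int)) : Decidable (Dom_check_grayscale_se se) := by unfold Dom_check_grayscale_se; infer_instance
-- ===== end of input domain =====

-- B replaces A's single interleaved loop (compare-each-row-length-to-first accumulator) with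
-- separate whole-list passes: a set of row lengths, one pass over all values, then the parity test.

-- ===== PORT A =====
-- the inner 'for subitem in item: if subitem not in range(256): return False' loop
def pvRowOkA (item : List Int) : Bool := item.all (fun sub => decide (0 ≤ sub ∧ sub < 256))

-- the main 'for item in se' loop carrying b; 'none' result = early 'return False'
def pvLoopA : List (List Int) → Option Nat → Option (Option Nat)
  | [], b => some b
  | item :: rest, b =>
    let l := item.length
    match b with
    | none => if pvRowOkA item then pvLoopA rest (some l) else none
    | some bv =>
      if bv ≠ l then none
      else if pvRowOkA item then pvLoopA rest (some bv) else none

def check_grayscale_se (se : List (List Int)) : Bool :=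
  let a := se.length
  match pvLoopA se none with
  | none => false
  | some b =>
    decide (a % 2 = 1) && (match b with
      | none => false
      | some bv => decide (bv % 2 = 1))

-- ===== PORT B =====
def check_grayscale_se_alt (se : List (List Int)) : Bool :=
  if se.isEmpty then false
  else if (PySem.Set.ofList (se.map List.length)).length ≠ 1 then false
  else if !(se.all (fun item => item.all (fun sub => decide (0 ≤ sub ∧ sub < 256)))) then false
  else decide (se.length % 2 = 1) && decide ((se.headD []).length % 2 = 1)

-- ===== PRECONDITION & SPEC =====
def Spec_check_grayscale_se (se : List (List Int)) (out : Bool) : Prop := out = check_grayscale_se_alt se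
instance (se : List (List Int)) (out : Bool) : Decidable (Spec_check_grayscale_se se out) := by unfold Spec_check_grayscale_se; infer_instance

-- ===== CLAIM (what is proved, stated in full; the proofs are below) =====
def Claim_equal_check_grayscale_se : Prop := ∀ (se : List (List Int)), Dom_check_grayscale_se se → Spec_check_grayscale_se se (check_grayscale_se se)

-- ===== LEMMAS AND PROOFS =====

lemma pvLoopA_some (rest : List (List Int)) (bv : Nat) :
    pvLoopA rest (some bv) =
      if rest.all (fun r => (r.length == bv) && pvRowOkA r) then some (some bv) else none := by
  induction rest with
  | nil => simp [pvLoopA]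
  | cons r rs ih =>
    simp only [pvLoopA, List.all_cons]
    by_cases hl : bv = r.length
    · subst hl
      by_cases hr : pvRowOkA r = true <;> simp [hr, ih]
    · have : (r.length == bv) = false := by simp [Ne.symm hl]
      simp [hl, this]

lemma pvSet_add_len_le {α : Type} [BEq α] (s : PySem.Set α) (y : α) :
    s.length ≤ (PySem.Set.add s y).length := by
  unfold PySem.Set.add
  split <;> simp

lemma pvFoldl_add_len_le {α : Type} [BEq α] (ys : List α) (s : PySem.Set α) :
    s.length ≤ (ys.foldl PySem.Set.add s).length := by
  induction ys generalizing s with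
  | nil => simp
  | cons y ys ih => exact le_trans (pvSet_add_len_le s y) (ih _)

lemma pvFoldl_add_pair_len {α : Type} [BEq α] (ys : List α) (x y : α) :
    (ys.foldl PySem.Set.add [x, y]).length ≠ 1 := by
  have h := pvFoldl_add_len_le ys [x, y]
  simp at h
  omega

lemma pvSet_add_self (x : Nat) : PySem.Set.add [x] x = [x] := by
  unfold PySem.Set.add PySem.Set.contains
  simp

lemma pvSet_add_ne (x y : Nat) (h : y ≠ x) : PySem.Set.add [x] y = [x, y] := by
  unfold PySem.Set.add PySem.Set.contains
  simp [h]

lemma pvSet_singleton_iff (ys : List Nat) (x : Nat) :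
    ((ys.foldl PySem.Set.add [x]).length = 1) ↔ ys.all (· == x) := by
  induction ys with
  | nil => simp
  | cons y ys ih =>
    by_cases h : y = x
    · subst h
      simp only [List.foldl_cons, List.all_cons, pvSet_add_self]
      simp [ih]
    · simp only [List.foldl_cons, List.all_cons, pvSet_add_ne x y h]
      simp [pvFoldl_add_pair_len ys x y, h]

lemma pvSet_ofList_lengths (x : List Int) (xs : List (List Int)) :
    ((PySem.Set.ofList ((x :: xs).map List.length)).length = 1) ↔
      (xs.map List.length).all (· == x.length) := by
  rw [PySem.Set.ofList_eq_foldl]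
  simp only [List.map_cons, List.foldl_cons]
  have h0 : PySem.Set.add ([] : PySem.Set Nat) x.length = [x.length] := by
    unfold PySem.Set.add PySem.Set.contains
    simp
  rw [h0]
  exact pvSet_singleton_iff _ _

lemma pvA_cons (x : List Int) (xs : List (List Int)) :
    check_grayscale_se (x :: xs) =
      if pvRowOkA x && xs.all (fun r => (r.length == x.length) && pvRowOkA r) then
        (decide ((x :: xs).length % 2 = 1) && decide (x.length % 2 = 1))
      else false := by
  unfold check_grayscale_se
  rw [show pvLoopA (x :: xs) none
      = if pvRowOkA x then pvLoopA xs (some x.length) else none from rfl]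
  by_cases hx : pvRowOkA x = true
  · rw [if_pos hx, pvLoopA_some]
    by_cases ha : xs.all (fun r => (r.length == x.length) && pvRowOkA r) = true
    · simp [ha, hx]
    · simp [ha, hx]
  · simp [hx]

lemma pvB_cons (x : List Int) (xs : List (List Int)) :
    check_grayscale_se_alt (x :: xs) =
      if (xs.map List.length).all (· == x.length)
          && (x :: xs).all (fun item => item.all (fun sub => decide (0 ≤ sub ∧ sub < 256))) then
        (decide ((x :: xs).length % 2 = 1) && decide (x.length % 2 = 1))
      else false := by
  unfold check_grayscale_se_alt
  simp only [List.isEmpty_cons, Bool.false_eq_true, if_false, List.headD_cons]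
  by_cases hl : (xs.map List.length).all (· == x.length) = true
  · have h1 : (PySem.Set.ofList ((x :: xs).map List.length)).length = 1 :=
      (pvSet_ofList_lengths x xs).mpr hl
    rw [if_neg (fun hne => hne h1)]
    by_cases hv : (x :: xs).all (fun item => item.all (fun sub => decide (0 ≤ sub ∧ sub < 256))) = true
    · rw [if_neg (by rw [hv]; decide), if_pos (by rw [hl, hv]; rfl)]
      rfl
    · have hv' := eq_false_of_ne_true hv
      rw [if_pos (by rw [hv']; decide), if_neg (by rw [hv']; simp)]
  · have hset : (PySem.Set.ofList ((x :: xs).map List.length)).length ≠ 1 := by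
      intro h
      exact hl ((pvSet_ofList_lengths x xs).mp h)
    rw [if_pos hset, if_neg (by rw [eq_false_of_ne_true hl]; simp)]

lemma pvConds_eq (x : List Int) (xs : List (List Int)) :
    (pvRowOkA x && xs.all (fun r => (r.length == x.length) && pvRowOkA r))
      = ((xs.map List.length).all (· == x.length)
          && (x :: xs).all (fun item => item.all (fun sub => decide (0 ≤ sub ∧ sub < 256)))) := by
  rw [Bool.eq_iff_iff]
  simp only [Bool.and_eq_true, List.all_eq_true, List.all_cons, List.all_map, pvRowOkA,
    Function.comp, beq_iff_eq]
  constructor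
  · rintro ⟨hx, hrest⟩
    exact ⟨fun r hr => (hrest r hr).1, hx, fun r hr => (hrest r hr).2⟩
  · rintro ⟨hlen, hx, hrest⟩
    exact ⟨hx, fun r hr => ⟨hlen r hr, hrest r hr⟩⟩

-- ===== VERDICT (by name: the statement is the Claim_ definition above) =====
theorem check_grayscale_se_spec : Claim_equal_check_grayscale_se := by
  intro se _
  unfold Spec_check_grayscale_se
  cases se with
  | nil => rfl
  | cons x xs => rw [pvA_cons, pvB_cons, pvConds_eq]
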